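-- pv_equiv track=rewrite | github.com/pvcraven/2048 | grid_functions.py | compress_up
-- ===== SOURCE A (Python) =====
-- from typing import List
--
-- def compress_up(grid: List) -> bool:
--     changed = False
--     for col_no in range(len(grid[0])):
--         row_no = 0
--         for i in range(len(grid)):
--             if grid[row_no][col_no] != 0:
--                 # No zero, look further
--                 row_no += 1
--             else:
--                 # Found a zero, shift cells
--                 r = row_no
--                 while r < len(grid) - 1:
--                     grid[r][col_no] = grid[r + 1][col_no]
--                     if grid[r][col_no]:
--                         changed = True
--                     r += 1
--                 grid[-1][col_no] = 0
--     return changed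
-- ===== SOURCE B (Python) =====
-- def compress_up(grid):
--     changed = False
--     n = len(grid)
--     w = len(grid[0])
--     zero_cols = set()
--     for row in grid:
--         head = row[:w]
--         if 0 in head:
--             zero_cols.update(c for c, x in enumerate(head) if x == 0)
--     for col in sorted(zero_cols):
--         out_r = 0
--         seen_zero = False
--         for r in range(n):
--             v = grid[r][col]
--             if v == 0:
--                 seen_zero = True
--             else:
--                 if seen_zero:
--                     changed = True
--                 grid[out_r][col] = v
--                 out_r += 1
--         for r in range(out_r, n):
--             grid[r][col] = 0
--     return changed
-- ===== Notes on version B (the rewrite author's own statement) =====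
-- stated objective: faster
-- what changed: A compresses each column by repeatedly shifting the whole remaining column up whenever a zero is found (an O(R^2) worst-case pass per column, and a full Python scan of every column even when nothing moves); B first finds the columns that contain a zero using C-speed row scans ('0 in row[:w]'), then compresses only those columns with a single two-pointer pass each.
import Mathlib
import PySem

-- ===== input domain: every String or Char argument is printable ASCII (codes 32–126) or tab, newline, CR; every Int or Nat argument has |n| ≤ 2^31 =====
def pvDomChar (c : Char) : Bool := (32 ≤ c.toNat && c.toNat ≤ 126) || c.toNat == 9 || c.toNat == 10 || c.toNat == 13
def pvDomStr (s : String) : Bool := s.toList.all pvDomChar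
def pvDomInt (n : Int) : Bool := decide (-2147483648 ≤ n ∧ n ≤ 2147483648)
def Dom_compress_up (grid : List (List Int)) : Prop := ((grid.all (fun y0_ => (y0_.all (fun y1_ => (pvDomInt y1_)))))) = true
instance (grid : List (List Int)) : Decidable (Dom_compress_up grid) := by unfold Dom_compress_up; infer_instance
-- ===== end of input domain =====

-- B finds the columns containing a zero by C-speed row scans and compresses only those with a
-- single two-pointer pass each (A re-shifts the whole remaining column at every zero); the
-- timing run measured B faster. A and B mutate `grid` identically in Python; the equivalence
-- proved here is about the RETURN value only.

-- ===== PORT A =====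
-- grid[r][c] read; all accesses are in range under Pre_ (getD default never used there)
def pvCellA (g : List (List Int)) (r c : Nat) : Int := (g.getD r []).getD c 0

-- grid[r][c] = v
def pvSetA (g : List (List Int)) (r c : Nat) (v : Int) : List (List Int) :=
  g.set r ((g.getD r []).set c v)

-- the `while r < len(grid) - 1` shift loop: bounded while, transliterated as a fold over the
-- remaining row indices r = start, …, n-2 (n = len(grid))
def pvShiftA (c start n : Nat) (st : List (List Int) × Bool) : List (List Int) × Bool :=
  (List.range' start (n - 1 - start)).foldl
    (fun st r =>
      let g' := pvSetA st.1 r c (pvCellA st.1 (r + 1) c)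
      (g', st.2 || decide (pvCellA g' r c ≠ 0))) st

-- one iteration of the `for i in range(len(grid))` body for column c
def pvColStepA (c n : Nat) (st : List (List Int) × Nat × Bool) : List (List Int) × Nat × Bool :=
  if pvCellA st.1 st.2.1 c ≠ 0 then
    (st.1, st.2.1 + 1, st.2.2)
  else
    let sh := pvShiftA c st.2.1 n (st.1, st.2.2)
    -- grid[-1][col] = 0 : the last row, index n-1 (grid nonempty under Pre_)
    (pvSetA sh.1 (n - 1) c 0, st.2.1, sh.2)

def compress_up (grid : List (List Int)) : Bool :=
  -- len(grid[0]); Pre_ excludes the empty grid, on which Python raises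
  let w := (grid.headD []).length
  (((List.range w).foldl
      (fun (st : List (List Int) × Bool) c =>
        let n := st.1.length
        let inner := (List.range n).foldl (fun s _ => pvColStepA c n s) (st.1, 0, st.2)
        (inner.1, inner.2.2))
      (grid, false))).2

-- ===== PORT B =====
-- the inner `for r in range(n)` scan of Source B over a zero column; state = (seen_zero, changed).
-- Source B's in-place writes go to row out_r ≤ r of the column being scanned (earlier iterations
-- wrote only to other columns), so no read ever sees a written value: the scan reads the
-- original column, extracted here as a list.
def pvColScanB (xs : List Int) (chg : Bool) : Bool :=
  (xs.foldl
    (fun (st : Bool × Bool) v =>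
      if v == 0 then (true, st.2) else (st.1, st.2 || st.1))
    (false, chg)).2

-- zero_cols.update(c for c, x in enumerate(head) if x == 0)
def pvZeroIdxs (head : List Int) : List Int :=
  ((PySem.List.enumerate head).filter (fun p => p.2 == 0)).map Prod.fst

def compress_up_alt (grid : List (List Int)) : Bool :=
  let w := (grid.headD []).length   -- len(grid[0]); Pre_ excludes the empty grid
  -- row[:w] is row.take w (exact: w ≥ 0); `0 in head` is head.contains 0
  let zcols := grid.foldl
    (fun (s : PySem.Set Int) row =>
      if (row.take w).contains 0 then PySem.Set.update s (pvZeroIdxs (row.take w)) else s)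
    PySem.Set.empty
  (PySem.List.sorted zcols (fun x => x)).foldl
    (fun chg c => pvColScanB (grid.map (fun row => PySem.List.pyGetD row c 0)) chg) false

-- ===== PRECONDITION & SPEC =====
-- Pre_: grid nonempty and every row at least as long as row 0. This is exactly where Python A
-- returns: on the empty grid, or whenever some row is shorter than row 0, A raises IndexError.
def Pre_compress_up (grid : List (List Int)) : Prop :=
  grid ≠ [] ∧ ∀ row ∈ grid, (grid.headD []).length ≤ row.length

instance (grid : List (List Int)) : Decidable (Pre_compress_up grid) := by
  unfold Pre_compress_up; infer_instance

def pvWitness_compress_up : List (List Int) := [[0, 2], [2, 0]]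

def Spec_compress_up (grid : List (List Int)) (out : Bool) : Prop := out = compress_up_alt grid
instance (grid : List (List Int)) (out : Bool) : Decidable (Spec_compress_up grid out) := by
  unfold Spec_compress_up; infer_instance

-- ===== CLAIM (what is proved, stated in full; the proofs are below) =====
def Claim_equal_compress_up : Prop :=
  ∀ (grid : List (List Int)), Dom_compress_up grid → Pre_compress_up grid →
    Spec_compress_up grid (compress_up grid)

-- ===== LEMMAS AND PROOFS =====

-- column c of g, as read by both programs
def pvColGet (g : List (List Int)) (c : Nat) : List Int := g.map (fun row => row.getD c 0)

-- g with column c replaced by v (rowwise set)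
def pvUpdCol (g : List (List Int)) (c : Nat) (v : List Int) : List (List Int) :=
  List.zipWith (fun row x => row.set c x) g v

def pvNZ (x : Int) : Bool := decide (x ≠ 0)

-- "some zero has a nonzero strictly below it": the per-column change condition
def pvBad : List Int → Bool
  | [] => false
  | v :: t => if v = 0 then t.any pvNZ else pvBad t

-- small getD/set helpers
theorem pvGetD_set_self (l : List Int) (i : Nat) (x : Int) (h : i < l.length) :
    (l.set i x).getD i 0 = x := by
  simp [List.getD_eq_getElem?_getD, h]

theorem pvGetD_set_ne (l : List Int) (i j : Nat) (x : Int) (h : i ≠ j) :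
    (l.set i x).getD j 0 = l.getD j 0 := by
  simp [List.getD_eq_getElem?_getD, List.getElem?_set_ne h]

-- row i of pvUpdCol
theorem pvUpdCol_getD_row (g : List (List Int)) (c : Nat) (v : List Int) (i : Nat)
    (hv : v.length = g.length) :
    (pvUpdCol g c v).getD i [] = (g.getD i []).set c (v.getD i 0) := by
  induction g generalizing v i with
  | nil => cases v with
    | nil => simp [pvUpdCol]
    | cons x t => simp at hv
  | cons row g' ih =>
    cases v with
    | nil => simp at hv
    | cons x t =>
      cases i with
      | zero => simp [pvUpdCol]
      | succ i => simpa [pvUpdCol] using ih t i (by simpa using hv)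

theorem pvUpdCol_length (g : List (List Int)) (c : Nat) (v : List Int)
    (hv : v.length = g.length) : (pvUpdCol g c v).length = g.length := by
  simp [pvUpdCol, hv]

theorem pvCellA_updCol (g : List (List Int)) (c : Nat) (v : List Int) (i : Nat)
    (hv : v.length = g.length) (hc : ∀ row ∈ g, c < row.length) :
    pvCellA (pvUpdCol g c v) i c = v.getD i 0 := by
  unfold pvCellA
  rw [pvUpdCol_getD_row g c v i hv]
  by_cases hi : i < g.length
  · refine pvGetD_set_self _ _ _ ?_
    have h1 : g.getD i [] = g[i] := List.getD_eq_getElem g [] hi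
    rw [h1]; exact hc _ (List.getElem_mem hi)
  · have hg : g.length ≤ i := by omega
    have hvi : v.length ≤ i := by omega
    simp [List.getD_eq_getElem?_getD, List.getElem?_eq_none hg, List.getElem?_eq_none hvi]

theorem pvSetA_updCol (g : List (List Int)) (c : Nat) (v : List Int) (i : Nat) (x : Int)
    (hv : v.length = g.length) :
    pvSetA (pvUpdCol g c v) i c x = pvUpdCol g c (v.set i x) := by
  induction g generalizing v i with
  | nil => cases v with
    | nil => simp [pvUpdCol, pvSetA]
    | cons y t => simp at hv
  | cons row g' ih =>
    cases v with
    | nil => simp at hv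
    | cons y t =>
      cases i with
      | zero => simp [pvUpdCol, pvSetA, List.set_set]
      | succ i =>
        have h := ih t i (by simpa using hv)
        simp only [pvUpdCol, pvSetA, List.zipWith_cons_cons, List.getD_cons_succ,
          List.set_cons_succ] at h ⊢
        rw [h]

theorem pvColGet_updCol_ne (g : List (List Int)) (c c' : Nat) (v : List Int)
    (hv : v.length = g.length) (hne : c' ≠ c) :
    pvColGet (pvUpdCol g c v) c' = pvColGet g c' := by
  induction g generalizing v with
  | nil => cases v with
    | nil => simp [pvUpdCol]
    | cons x t => simp at hv
  | cons row g' ih =>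
    cases v with
    | nil => simp at hv
    | cons x t =>
      simp only [pvUpdCol, pvColGet, List.zipWith_cons_cons, List.map_cons] at ih ⊢
      rw [pvGetD_set_ne row c c' x (fun h => hne h.symm)]
      rw [ih t (by simpa using hv)]

theorem pvUpdCol_colGet_self (g : List (List Int)) (c : Nat)
    (hc : ∀ row ∈ g, c < row.length) : pvUpdCol g c (pvColGet g c) = g := by
  induction g with
  | nil => simp [pvUpdCol, pvColGet]
  | cons row g' ih =>
    simp only [pvUpdCol, pvColGet, List.map_cons, List.zipWith_cons_cons]
    have hlt : c < row.length := hc row (by simp)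
    rw [List.getD_eq_getElem row 0 hlt, List.set_getElem_self]
    have := ih (fun r hr => hc r (by simp [hr]))
    simp only [pvUpdCol, pvColGet] at this
    rw [this]

theorem pvColGet_length (g : List (List Int)) (c : Nat) :
    (pvColGet g c).length = g.length := by
  simp [pvColGet]

-- rows of pvUpdCol keep their lengths
theorem pvUpdCol_rows (g : List (List Int)) (c c' : Nat) (v : List Int)
    (hv : v.length = g.length) (hc : ∀ row ∈ g, c' < row.length) :
    ∀ row ∈ pvUpdCol g c v, c' < row.length := by
  intro row hrow
  obtain ⟨i, hi, rfl⟩ := List.mem_iff_getElem.1 hrow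
  have hig : i < g.length := by
    have := pvUpdCol_length g c v hv; omega
  have hrow_eq : (pvUpdCol g c v)[i] = (g.getD i []).set c (v.getD i 0) := by
    rw [← List.getD_eq_getElem (pvUpdCol g c v) [] hi, pvUpdCol_getD_row g c v i hv]
  rw [hrow_eq, List.length_set, List.getD_eq_getElem g [] hig]
  exact hc _ (List.getElem_mem hig)

-- pure (single-column) versions of A's loops
def pvPureShift (start n : Nat) (st : List Int × Bool) : List Int × Bool :=
  (List.range' start (n - 1 - start)).foldl
    (fun st r =>
      let v' := st.1.set r (st.1.getD (r + 1) 0)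
      (v', st.2 || decide (v'.getD r 0 ≠ 0))) st

def pvPureStep (n : Nat) (st : List Int × Nat × Bool) : List Int × Nat × Bool :=
  if st.1.getD st.2.1 0 ≠ 0 then (st.1, st.2.1 + 1, st.2.2)
  else
    ((pvPureShift st.2.1 n (st.1, st.2.2)).1.set (n - 1) 0, st.2.1,
      (pvPureShift st.2.1 n (st.1, st.2.2)).2)

def pvBadAt (xs : List Int) (j : Nat) : Bool :=
  decide (xs.getD j 0 = 0) && (xs.drop (j + 1)).any pvNZ

theorem pvPureShift_length (start n : Nat) (v : List Int) (b : Bool) :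
    (pvPureShift start n (v, b)).1.length = v.length := by
  unfold pvPureShift
  generalize List.range' start (n - 1 - start) = L
  induction L generalizing v b with
  | nil => rfl
  | cons r L ih => simpa using ih (v.set r (v.getD (r + 1) 0)) _

theorem pvPureStep_length (n : Nat) (s : List Int × Nat × Bool) :
    (pvPureStep n s).1.length = s.1.length := by
  obtain ⟨v, r, b⟩ := s
  unfold pvPureStep
  split
  · rfl
  · simp only [List.length_set]
    exact pvPureShift_length r n v b

theorem pvPureFold_length (n : Nat) (L : List Nat) :
    ∀ s : List Int × Nat × Bool,
    ((L.foldl (fun s _ => pvPureStep n s) s).1).length = s.1.length := by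
  induction L with
  | nil => intro s; rfl
  | cons i L ih =>
    intro s
    simp only [List.foldl_cons]
    rw [ih, pvPureStep_length]

-- ===== simulation: A's grid loops project to the pure column loops =====

theorem pvShiftA_sim (g : List (List Int)) (c : Nat) (hc : ∀ row ∈ g, c < row.length)
    (start n : Nat) (v : List Int) (b : Bool) (hv : v.length = g.length) :
    pvShiftA c start n (pvUpdCol g c v, b)
      = (pvUpdCol g c (pvPureShift start n (v, b)).1, (pvPureShift start n (v, b)).2) := by
  unfold pvShiftA pvPureShift
  generalize List.range' start (n - 1 - start) = L
  induction L generalizing v b with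
  | nil => rfl
  | cons r L ih =>
    simp only [List.foldl_cons]
    rw [pvCellA_updCol g c v (r + 1) hv hc, pvSetA_updCol g c v r _ hv,
      pvCellA_updCol g c _ r (by simpa using hv) hc]
    exact ih (v.set r (v.getD (r + 1) 0)) _ (by simpa using hv)

theorem pvColStepA_sim (g : List (List Int)) (c : Nat) (hc : ∀ row ∈ g, c < row.length)
    (n : Nat) (v : List Int) (r : Nat) (b : Bool) (hv : v.length = g.length) :
    pvColStepA c n (pvUpdCol g c v, r, b)
      = (pvUpdCol g c (pvPureStep n (v, r, b)).1,
         (pvPureStep n (v, r, b)).2.1, (pvPureStep n (v, r, b)).2.2) := by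
  unfold pvColStepA pvPureStep
  simp only [pvCellA_updCol g c v r hv hc]
  split
  · rfl
  · simp only
    rw [pvShiftA_sim g c hc r n v b hv]
    rw [pvSetA_updCol g c _ (n - 1) 0 (by rw [pvPureShift_length]; exact hv)]

theorem pvFold_sim (g : List (List Int)) (c : Nat) (hc : ∀ row ∈ g, c < row.length)
    (n : Nat) (L : List Nat) :
    ∀ (v : List Int) (r : Nat) (b : Bool), v.length = g.length →
    L.foldl (fun s _ => pvColStepA c n s) (pvUpdCol g c v, r, b)
      = (pvUpdCol g c (L.foldl (fun s _ => pvPureStep n s) (v, r, b)).1,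
         (L.foldl (fun s _ => pvPureStep n s) (v, r, b)).2.1,
         (L.foldl (fun s _ => pvPureStep n s) (v, r, b)).2.2) := by
  induction L with
  | nil => intro v r b hv; rfl
  | cons i L ih =>
    intro v r b hv
    simp only [List.foldl_cons]
    rw [pvColStepA_sim g c hc n v r b hv]
    have hlen : (pvPureStep n (v, r, b)).1.length = g.length := by
      rw [pvPureStep_length]; exact hv
    exact ih (pvPureStep n (v, r, b)).1 (pvPureStep n (v, r, b)).2.1
      (pvPureStep n (v, r, b)).2.2 hlen

-- ===== closed form of the shift loop followed by zeroing the last row =====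

theorem pvPureShift_closed (n : Nat) :
    ∀ (m start : Nat) (v : List Int) (b : Bool), v.length = n → n - 1 - start = m → start < n →
    (pvPureShift start n (v, b)).1.set (n - 1) 0
        = v.take start ++ v.drop (start + 1) ++ [0]
      ∧ (pvPureShift start n (v, b)).2 = (b || (v.drop (start + 1)).any pvNZ) := by
  intro m
  induction m with
  | zero =>
    intro start v b hv hm hs
    have hstart : start = n - 1 := by omega
    subst hstart
    unfold pvPureShift
    rw [hm]
    simp only [List.range'_zero, List.foldl_nil]
    have hnil : v.drop (n - 1 + 1) = [] := List.drop_eq_nil_of_le (by omega)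
    constructor
    · rw [List.set_eq_take_append_cons_drop, if_pos (by omega)]
      rw [show n - 1 + 1 = n - 1 + 1 from rfl, hnil]
      simp
    · simp [hnil]
  | succ m ih =>
    intro start v b hv hm hs
    have hs1 : start + 1 < n := by omega
    unfold pvPureShift
    rw [hm, List.range'_succ, List.foldl_cons]
    simp only
    have hread : (v.set start (v.getD (start + 1) 0)).getD start 0 = v.getD (start + 1) 0 :=
      pvGetD_set_self v start _ (by omega)
    rw [hread]
    have hm1 : n - 1 - (start + 1) = m := by omega
    have hv1 : (v.set start (v.getD (start + 1) 0)).length = n := by simpa using hv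
    have hih := ih (start + 1) (v.set start (v.getD (start + 1) 0))
      (b || decide (v.getD (start + 1) 0 ≠ 0)) hv1 hm1 hs1
    rw [pvPureShift, hm1] at hih
    obtain ⟨h1, h2⟩ := hih
    have hsplit : v.set start (v.getD (start + 1) 0)
        = v.take start ++ v.getD (start + 1) 0 :: v.drop (start + 1) := by
      rw [List.set_eq_take_append_cons_drop, if_pos (by omega)]
    have hltk : (v.take start).length = start := List.length_take_of_le (by omega)
    have hdropx : v.drop (start + 1) = v.getD (start + 1) 0 :: v.drop (start + 2) := by
      rw [List.drop_eq_getElem_cons (by omega : start + 1 < v.length),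
        List.getD_eq_getElem v 0 (by omega)]
    have hdrop : (v.set start (v.getD (start + 1) 0)).drop (start + 1 + 1)
        = v.drop (start + 2) := by
      rw [List.drop_set, if_pos (by omega)]
    constructor
    · rw [h1]
      have htake : (v.set start (v.getD (start + 1) 0)).take (start + 1)
          = v.take start ++ [v.getD (start + 1) 0] := by
        rw [hsplit, List.take_append, List.take_of_length_le (by rw [List.length_take]; omega),
          hltk, show start + 1 - start = 1 by omega]
        simp
      rw [htake, hdrop, hdropx]
      simp
    · rw [h2, hdrop, hdropx]
      simp [pvNZ, Bool.or_assoc]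

-- ===== the invariant of A's inner row loop, on a pure column =====

theorem pvInner_inv (xs : List Int) (b : Bool) :
    ∀ k, k ≤ xs.length →
    (List.range k).foldl (fun s _ => pvPureStep xs.length s) (xs, 0, b)
      = (((xs.take k).filter pvNZ) ++ xs.drop k
           ++ List.replicate (k - ((xs.take k).filter pvNZ).length) 0,
         ((xs.take k).filter pvNZ).length,
         b || (List.range k).any (pvBadAt xs)) := by
  intro k
  induction k with
  | zero => intro _; simp
  | succ k ih =>
    intro hk1
    have hk : k < xs.length := by omega
    rw [List.range_succ, List.foldl_append, ih (by omega)]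
    set A := (xs.take k).filter pvNZ with hA
    have hrk_le : A.length ≤ k := by
      calc A.length ≤ (xs.take k).length := List.length_filter_le _ _
        _ ≤ k := by simp
    have hdropk : xs.drop k = xs[k] :: xs.drop (k + 1) := List.drop_eq_getElem_cons hk
    have hcell : (A ++ xs.drop k ++ List.replicate (k - A.length) 0).getD A.length 0
        = xs[k] := by
      rw [List.append_assoc, List.getD_append_right A _ 0 A.length (le_refl _),
        Nat.sub_self, hdropk]
      rfl
    have htake : xs.take (k + 1) = xs.take k ++ [xs[k]] := by
      rw [List.take_add_one]
      simp [List.getElem?_eq_getElem hk]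
    simp only [List.foldl_cons, List.foldl_nil]
    unfold pvPureStep
    simp only [hcell]
    by_cases hx : xs[k] = 0
    · rw [if_neg (by simp [hx])]
      have hlen : (A ++ xs.drop k ++ List.replicate (k - A.length) 0).length = xs.length := by
        simp only [List.length_append, List.length_replicate, List.length_drop]
        omega
      have hrk_lt : A.length < xs.length := by omega
      obtain ⟨h1, h2⟩ := pvPureShift_closed xs.length (xs.length - 1 - A.length) A.length
        (A ++ xs.drop k ++ List.replicate (k - A.length) 0)
        (b || (List.range k).any (pvBadAt xs)) hlen rfl hrk_lt
      rw [h1, h2]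
      have hAfilter : (xs.take (k + 1)).filter pvNZ = A := by
        rw [htake, List.filter_append, ← hA]
        simp [pvNZ, hx]
      have htk : (A ++ xs.drop k ++ List.replicate (k - A.length) 0).take A.length = A := by
        rw [List.append_assoc, List.take_append_of_le_length (le_refl _), List.take_length]
      have hdr : (A ++ xs.drop k ++ List.replicate (k - A.length) 0).drop (A.length + 1)
          = xs.drop (k + 1) ++ List.replicate (k - A.length) 0 := by
        rw [List.append_assoc, List.drop_append]
        rw [List.drop_eq_nil_of_le (by omega)]
        simp only [List.nil_append, List.length_take]
        rw [show A.length + 1 - A.length = 1 by omega, hdropk]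
        rfl
      have hbadk : pvBadAt xs k = (xs.drop (k + 1)).any pvNZ := by
        unfold pvBadAt
        rw [List.getD_eq_getElem xs 0 hk]
        simp [hx]
      refine Prod.ext ?_ (Prod.ext ?_ ?_)
      · simp only [htk, hdr, hAfilter]
        rw [show (k + 1 - A.length) = (k - A.length) + 1 by omega, List.replicate_succ']
        simp [List.append_assoc]
      · simp [hAfilter]
      · simp only [hdr, List.any_append, List.range_succ, List.any_cons, List.any_nil, hbadk]
        have hz : (List.replicate (k - A.length) (0 : Int)).any pvNZ = false := by simp [pvNZ]
        rw [hz]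
        cases b <;> cases (List.range k).any (pvBadAt xs) <;>
          cases (xs.drop (k + 1)).any pvNZ <;> rfl
    · rw [if_pos (by simp [hx])]
      have hAfilter : (xs.take (k + 1)).filter pvNZ = A ++ [xs[k]] := by
        rw [htake, List.filter_append, ← hA]
        simp [pvNZ, hx]
      have hbadk : pvBadAt xs k = false := by
        unfold pvBadAt
        rw [List.getD_eq_getElem xs 0 hk]
        simp [hx]
      refine Prod.ext ?_ (Prod.ext ?_ ?_)
      · simp only [hAfilter]
        rw [show (k + 1 - (A ++ [xs[k]]).length) = k - A.length by
          simp only [List.length_append, List.length_cons, List.length_nil]; omega]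
        rw [hdropk]
        simp [List.append_assoc]
      · simp [hAfilter]
      · simp [List.range_succ, hbadk]

-- pvBad true forces a nonzero element
theorem pvBad_any (t : List Int) (h : pvBad t = true) : t.any pvNZ = true := by
  induction t with
  | nil => simp [pvBad] at h
  | cons v t ih =>
    by_cases hv : v = 0
    · simp only [pvBad, if_pos hv] at h
      rw [List.any_cons, h, Bool.or_true]
    · simp only [pvBad, if_neg hv] at h
      rw [List.any_cons, ih h, Bool.or_true]

-- the indexed "bad" scan equals the recursive one
theorem pvRangeBad (xs : List Int) :
    (List.range xs.length).any (pvBadAt xs) = pvBad xs := by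
  induction xs with
  | nil => simp [pvBad]
  | cons v t ih =>
    have hshift : ∀ j, pvBadAt (v :: t) (j + 1) = pvBadAt t j := by
      intro j; unfold pvBadAt; simp
    have h0 : pvBadAt (v :: t) 0 = (decide (v = 0) && t.any pvNZ) := by
      unfold pvBadAt; simp
    rw [List.length_cons, List.range_succ_eq_map]
    simp only [List.any_cons, List.any_map]
    have hfun : pvBadAt (v :: t) ∘ Nat.succ = pvBadAt t :=
      funext (fun j => by simpa [Function.comp] using hshift j)
    have hcongr : (List.range t.length).any (pvBadAt (v :: t) ∘ Nat.succ)
        = (List.range t.length).any (pvBadAt t) := by rw [hfun]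
    rw [hcongr, ih, h0]
    by_cases hv : v = 0
    · simp only [pvBad, if_pos hv, hv, decide_true, Bool.true_and]
      cases ht : t.any pvNZ
      · have hbf : pvBad t = false := by
          cases hb : pvBad t
          · rfl
          · rw [pvBad_any t hb] at ht; exact ht
        simp [pvBad, hv, hbf, ht]
      · simp [pvBad, hv, ht]
    · simp [pvBad, hv]

-- B's column scan equals pvBad
theorem pvColScanB_aux (xs : List Int) :
    ∀ (s chg : Bool),
    (xs.foldl (fun (st : Bool × Bool) v =>
        if v == 0 then (true, st.2) else (st.1, st.2 || st.1)) (s, chg)).2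
      = (chg || (if s then xs.any pvNZ else pvBad xs)) := by
  induction xs with
  | nil => intro s chg; simp [pvBad]
  | cons v t ih =>
    intro s chg
    simp only [List.foldl_cons]
    by_cases hv : v = 0
    · rw [if_pos (by simp [hv]), ih true chg]
      cases s
      · simp [pvBad, hv]
      · simp [hv, pvNZ]
    · rw [if_neg (by simp [hv]), ih s (chg || s)]
      cases s
      · simp [pvBad, hv]
      · simp [hv, pvNZ, Bool.or_assoc]

theorem pvColScanB_eq (xs : List Int) (chg : Bool) :
    pvColScanB xs chg = (chg || pvBad xs) := by
  unfold pvColScanB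
  rw [pvColScanB_aux xs false chg]
  simp

-- ===== one whole column of A =====

theorem pvInnerA (g : List (List Int)) (c : Nat) (b : Bool)
    (hc : ∀ row ∈ g, c < row.length) :
    ∃ V : List Int, V.length = g.length ∧
      (List.range g.length).foldl (fun s _ => pvColStepA c g.length s) (g, 0, b)
        = (pvUpdCol g c V,
           ((List.range g.length).foldl (fun s _ => pvPureStep g.length s)
             (pvColGet g c, 0, b)).2.1,
           b || pvBad (pvColGet g c)) := by
  have hlen : (pvColGet g c).length = g.length := pvColGet_length g c
  have hself : pvUpdCol g c (pvColGet g c) = g := pvUpdCol_colGet_self g c hc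
  refine ⟨((List.range g.length).foldl (fun s _ => pvPureStep g.length s)
      (pvColGet g c, 0, b)).1, ?_, ?_⟩
  · rw [pvPureFold_length]; exact hlen
  · have hsim := pvFold_sim g c hc g.length (List.range g.length) (pvColGet g c) 0 b hlen
    rw [hself] at hsim
    rw [hsim]
    have hinv := pvInner_inv (pvColGet g c) b (pvColGet g c).length (le_refl _)
    rw [hlen] at hinv
    congr 1
    congr 1
    rw [hinv]
    simp only
    rw [← hlen, pvRangeBad]

-- ===== the outer column loop =====

theorem pvOuterA (L : List Nat) :
    ∀ (g : List (List Int)) (chg : Bool),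
    (∀ c ∈ L, ∀ row ∈ g, c < row.length) → L.Nodup →
    (L.foldl
      (fun (st : List (List Int) × Bool) c =>
        let n := st.1.length
        let inner := (List.range n).foldl (fun s _ => pvColStepA c n s) (st.1, 0, st.2)
        (inner.1, inner.2.2))
      (g, chg)).2
      = L.foldl (fun ch c => ch || pvBad (pvColGet g c)) chg := by
  induction L with
  | nil => intro g chg _ _; rfl
  | cons c L ih =>
    intro g chg hc hnd
    simp only [List.foldl_cons]
    obtain ⟨V, hV, hstep⟩ := pvInnerA g c chg (hc c (by simp))
    rw [hstep]
    simp only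
    have hrows : ∀ c' ∈ L, ∀ row ∈ pvUpdCol g c V, c' < row.length := by
      intro c' hc' row hrow
      exact pvUpdCol_rows g c c' V hV (fun r hr => hc c' (by simp [hc']) r hr) row hrow
    rw [ih (pvUpdCol g c V) (chg || pvBad (pvColGet g c)) hrows (List.Nodup.of_cons hnd)]
    refine PySem.List.foldl_congr_mem L _ _ _ ?_
    intro acc c' hc'
    have hne : c' ≠ c := by
      intro h; subst h
      exact (List.nodup_cons.1 hnd).1 hc'
    rw [pvColGet_updCol_ne g c c' V hV hne]

-- ===== bridging B's zero-column skipping to the per-column condition =====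

theorem pvFoldlOrAny {α : Type} (L : List α) (f : α → Bool) :
    ∀ b : Bool, L.foldl (fun chg c => chg || f c) b = (b || L.any f) := by
  induction L with
  | nil => intro b; simp
  | cons x L ih =>
    intro b
    simp only [List.foldl_cons, List.any_cons, ih]
    simp [Bool.or_assoc]

theorem pvBad_zero (xs : List Int) (h : pvBad xs = true) :
    ∃ i, ∃ _ : i < xs.length, xs[i] = 0 := by
  induction xs with
  | nil => simp [pvBad] at h
  | cons v t ih =>
    by_cases hv : v = 0
    · exact ⟨0, by simp, by simpa using hv⟩
    · simp only [pvBad, if_neg hv] at h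
      obtain ⟨i, hi, h0⟩ := ih h
      exact ⟨i + 1, by simpa using hi, by simpa using h0⟩

theorem pvMem_zeroIdxs (head : List Int) (c : Int) :
    c ∈ pvZeroIdxs head ↔ ∃ k, ∃ _ : k < head.length, c = (k : Int) ∧ head[k] = 0 := by
  unfold pvZeroIdxs
  simp only [List.mem_map, List.mem_filter, PySem.List.mem_enumerate_iff]
  constructor
  · rintro ⟨p, ⟨⟨k, hk, rfl⟩, hx⟩, rfl⟩
    exact ⟨k, hk, by simp, by simpa using hx⟩
  · rintro ⟨k, hk, rfl, h0⟩
    exact ⟨((0 : Int) + (k : Int), head[k]), ⟨⟨k, hk, rfl⟩, by simpa using h0⟩, by simp⟩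

-- zero_cols as the port builds it (proof-side name for the port's fold)
def pvZC (grid : List (List Int)) : PySem.Set Int :=
  grid.foldl
    (fun (s : PySem.Set Int) row =>
      if (row.take (grid.headD []).length).contains 0 then
        PySem.Set.update s (pvZeroIdxs (row.take (grid.headD []).length))
      else s)
    PySem.Set.empty

theorem pvMem_zfold (w : Nat) (rows : List (List Int)) :
    ∀ (s : PySem.Set Int) (c : Int),
    (c ∈ rows.foldl
        (fun (s : PySem.Set Int) row =>
          if (row.take w).contains 0 then PySem.Set.update s (pvZeroIdxs (row.take w)) else s)
        s)
      ↔ (c ∈ s ∨ ∃ row ∈ rows, c ∈ pvZeroIdxs (row.take w)) := by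
  induction rows with
  | nil => intro s c; simp
  | cons row rows ih =>
    intro s c
    simp only [List.foldl_cons]
    by_cases hz : ((row.take w).contains 0) = true
    · rw [if_pos hz, ih, PySem.Set.mem_update]
      simp only [List.mem_cons]
      constructor
      · rintro (⟨hs | hin⟩ | ⟨r, hr, hcr⟩)
        · exact Or.inl hs
        · exact Or.inr ⟨row, Or.inl rfl, hin⟩
        · exact Or.inr ⟨r, Or.inr hr, hcr⟩
      · rintro (hs | ⟨r, (rfl | hr), hcr⟩)
        · exact Or.inl (Or.inl hs)
        · exact Or.inl (Or.inr hcr)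
        · exact Or.inr ⟨r, hr, hcr⟩
    · rw [if_neg hz, ih]
      simp only [List.mem_cons]
      constructor
      · rintro (hs | ⟨r, hr, hcr⟩)
        · exact Or.inl hs
        · exact Or.inr ⟨r, Or.inr hr, hcr⟩
      · rintro (hs | ⟨r, (rfl | hr), hcr⟩)
        · exact Or.inl hs
        · exfalso
          rw [pvMem_zeroIdxs] at hcr
          obtain ⟨k, hk, _, h0⟩ := hcr
          have hmem : (0 : Int) ∈ r.take w := h0 ▸ List.getElem_mem hk
          exact hz (by simpa using hmem)
        · exact Or.inr ⟨r, hr, hcr⟩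

-- ===== VERDICT (by name: the statement is the Claim_ definition above) =====
theorem compress_up_spec : Claim_equal_compress_up := by
  intro grid _ hpre
  unfold Spec_compress_up compress_up
  obtain ⟨hne, hrows⟩ := hpre
  have hc : ∀ c ∈ List.range (grid.headD []).length, ∀ row ∈ grid, c < row.length := by
    intro c hcmem row hrow
    have h1 := hrows row hrow
    have h2 := List.mem_range.1 hcmem
    omega
  rw [pvOuterA (List.range (grid.headD []).length) grid false hc List.nodup_range,
    pvFoldlOrAny, Bool.false_or]
  -- B's side: the per-column scan, restricted to the sorted set of zero columns
  have hBdef : compress_up_alt grid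
      = (PySem.List.sorted (pvZC grid) (fun x => x)).foldl
          (fun chg c => pvColScanB (grid.map (fun row => PySem.List.pyGetD row c 0)) chg)
          false := rfl
  rw [hBdef,
    PySem.List.foldl_congr_mem _ _
      (fun chg c => chg || pvBad (grid.map (fun row => PySem.List.pyGetD row c 0))) _
      (fun chg c _ => pvColScanB_eq _ chg),
    pvFoldlOrAny, Bool.false_or]
  -- the two `any`s agree: a column contributes iff it is a zero column that changes
  have hcol : ∀ k : Nat,
      grid.map (fun row => PySem.List.pyGetD row (k : Int) 0) = pvColGet grid k := by
    intro k
    unfold pvColGet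
    exact List.map_congr_left (fun row _ => PySem.List.pyGetD_natCast row k 0)
  have hmemZC : ∀ c : Int, c ∈ pvZC grid ↔
      ∃ row ∈ grid, c ∈ pvZeroIdxs (row.take (grid.headD []).length) := by
    intro c
    unfold pvZC
    rw [pvMem_zfold (grid.headD []).length grid PySem.Set.empty c]
    simp [PySem.Set.empty]
  cases hA : (List.range (grid.headD []).length).any (fun c => pvBad (pvColGet grid c))
  · cases hB : (PySem.List.sorted (pvZC grid) (fun x => x)).any
        (fun c => pvBad (grid.map (fun row => PySem.List.pyGetD row c 0)))
    · rfl
    · exfalso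
      obtain ⟨c, hcmem, hfc⟩ := List.any_eq_true.1 hB
      rw [PySem.List.mem_sorted] at hcmem
      obtain ⟨row, hrowmem, hidx⟩ := (hmemZC c).1 hcmem
      rw [pvMem_zeroIdxs] at hidx
      obtain ⟨k, hk, rfl, _⟩ := hidx
      have hkw : k < (grid.headD []).length := by
        have := List.length_take_le (grid.headD []).length row
        have h2 : (row.take (grid.headD []).length).length
            = min (grid.headD []).length row.length := List.length_take ..
        omega
      rw [hcol k] at hfc
      have : (List.range (grid.headD []).length).any
          (fun c => pvBad (pvColGet grid c)) = true :=
        List.any_eq_true.2 ⟨k, List.mem_range.2 hkw, hfc⟩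
      rw [hA] at this
      exact Bool.false_ne_true this
  · obtain ⟨k, hkmem, hfk⟩ := List.any_eq_true.1 hA
    have hkw := List.mem_range.1 hkmem
    obtain ⟨i, hi, hzero⟩ := pvBad_zero (pvColGet grid k) hfk
    have higrid : i < grid.length := by
      have := pvColGet_length grid k; omega
    have hrowmem : grid[i] ∈ grid := List.getElem_mem higrid
    have hklen : k < grid[i].length := by
      have := hrows grid[i] hrowmem; omega
    have hval : grid[i][k] = 0 := by
      have h1 : (pvColGet grid k)[i] = grid[i].getD k 0 := by
        unfold pvColGet
        simp
      rw [h1, List.getD_eq_getElem grid[i] 0 hklen] at hzero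
      exact hzero
    have hidx : (k : Int) ∈ pvZeroIdxs (grid[i].take (grid.headD []).length) := by
      rw [pvMem_zeroIdxs]
      have hklen2 : k < (grid[i].take (grid.headD []).length).length := by
        rw [List.length_take]; omega
      refine ⟨k, hklen2, rfl, ?_⟩
      rw [List.getElem_take]
      exact hval
    have hmem : (k : Int) ∈ PySem.List.sorted (pvZC grid) (fun x => x) := by
      rw [PySem.List.mem_sorted]
      exact (hmemZC (k : Int)).2 ⟨grid[i], hrowmem, hidx⟩
    symm
    refine List.any_eq_true.2 ⟨(k : Int), hmem, ?_⟩
    rw [hcol k]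
    exact hfk
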